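-- pv_equiv track=rewrite | github.com/JoseEliel/scribe | scribe/files.py | append_section_text
-- ===== SOURCE A (Python) =====
-- def append_section_text(existing: str, title: str, body: str) -> str:
--     body = (body or "").strip()
--     if not body:
--         return existing
--
--     sections: list[tuple[str, str]] = []
--     current_title: str | None = None
--     current_lines: list[str] = []
--     for line in existing.splitlines():
--         if line.startswith("=== ") and line.endswith(" ==="):
--             if current_title is not None:
--                 sections.append((current_title, "\n".join(current_lines).strip()))
--             current_title = line[4:-4].strip()
--             current_lines = []
--         else:
--             current_lines.append(line)
--     if current_title is not None:
--         sections.append((current_title, "\n".join(current_lines).strip()))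
--
--     for index, (section_title, _) in enumerate(sections):
--         if section_title == title:
--             sections[index] = (title, body)
--             break
--     else:
--         sections.append((title, body))
--
--     return "\n\n".join(f"=== {name} ===\n{content}" for name, content in sections if content)
-- ===== SOURCE B (Python) =====
-- def append_section_text(existing: str, title: str, body: str) -> str:
--     body = (body or "").strip()
--     if not body:
--         return existing
--
--     # single back-to-front pass: walking the lines in reverse, body lines pile up in
--     # `pending` until their header appears, so no current-title state or final flush
--     # is needed and pre-header junk falls away by itself
--     sections: list[tuple[str, str]] = []
--     pending: list[str] = []
--     for line in reversed(existing.splitlines()):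
--         if line.startswith("=== ") and line.endswith(" ==="):
--             sections.append((line[4:-4].strip(), "\n".join(reversed(pending)).strip()))
--             pending = []
--         else:
--             pending.append(line)
--     sections.reverse()
--
--     idx = next((i for i, (name, _) in enumerate(sections) if name == title), None)
--     if idx is None:
--         sections.append((title, body))
--     else:
--         sections = sections[:idx] + [(title, body)] + sections[idx + 1 :]
--
--     return "\n\n".join(f"=== {name} ===\n{content}" for name, content in sections if content)
-- ===== Notes on version B (the rewrite author's own statement) =====
-- stated objective: alternative
-- what changed: The parse is a single back-to-front pass with no current-title state and no final flush (pre-header lines and the trailing section fall out naturally), and the first-match replace/append loop becomes next() over enumerate plus list slicing instead of in-place mutation with break.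
import Mathlib
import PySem

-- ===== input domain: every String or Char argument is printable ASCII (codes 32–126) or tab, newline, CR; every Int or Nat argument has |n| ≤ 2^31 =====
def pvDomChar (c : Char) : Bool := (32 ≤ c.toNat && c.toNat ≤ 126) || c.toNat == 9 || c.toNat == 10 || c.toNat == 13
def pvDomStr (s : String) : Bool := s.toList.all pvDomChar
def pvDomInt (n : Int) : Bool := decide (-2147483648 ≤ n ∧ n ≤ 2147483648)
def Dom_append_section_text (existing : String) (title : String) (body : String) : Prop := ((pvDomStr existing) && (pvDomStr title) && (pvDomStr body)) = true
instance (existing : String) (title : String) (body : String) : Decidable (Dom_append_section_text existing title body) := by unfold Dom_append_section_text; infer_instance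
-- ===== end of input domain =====

-- B replaces A's forward state-machine parse (current_title/current_lines with a final
-- flush) by a single back-to-front pass with no title state, and the first-match
-- replace-or-append loop by next()/slicing; same value everywhere (objective: alternative).

-- helpers shared verbatim by both Pythons (identical header test, title slice, final join)
def pvIsHeader (line : String) : Bool :=
  PySem.Str.startswith line "=== " && PySem.Str.endswith line " ==="

def pvTitle (line : String) : String :=
  PySem.Str.strip (PySem.Str.slice line (some 4) (some (-4)))

def pvRender (secs : List (String × String)) : String :=
  PySem.Str.join "\n\n"
    ((secs.filter (fun p => p.2 != "")).map (fun p => "=== " ++ p.1 ++ " ===\n" ++ p.2))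

-- ===== PORT A =====
-- A's loop state: (sections, current_title, current_lines)
def pvStepA (st : List (String × String) × Option String × List String) (line : String) :
    List (String × String) × Option String × List String :=
  if pvIsHeader line then
    match st.2.1 with
    | some t => (st.1 ++ [(t, PySem.Str.strip (PySem.Str.join "\n" st.2.2))], some (pvTitle line), [])
    | none => (st.1, some (pvTitle line), [])
  else (st.1, st.2.1, st.2.2 ++ [line])

-- the trailing 'if current_title is not None: sections.append(...)'
def pvFinishA (st : List (String × String) × Option String × List String) :
    List (String × String) :=
  match st.2.1 with
  | some t => st.1 ++ [(t, PySem.Str.strip (PySem.Str.join "\n" st.2.2))]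
  | none => st.1

-- A's 'for index, (section_title, _) in enumerate(sections): … break' (first match)
def pvFindA (title : String) (i : Nat) : List (String × String) → Option Nat
  | [] => none
  | (t, _) :: rest => if t == title then some i else pvFindA title (i + 1) rest

def append_section_text (existing : String) (title : String) (body : String) : String :=
  let body := PySem.Str.strip body
  if body = "" then existing
  else
    let lines := PySem.Str.splitlines existing
    let sections := pvFinishA (lines.foldl pvStepA ([], none, []))
    let sections' :=
      match pvFindA title 0 sections with
      | some i => sections.set i (title, body)   -- sections[index] = (title, body)
      | none => sections ++ [(title, body)]
    pvRender sections'

-- ===== PORT B =====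
-- B's loop state: (sections-in-reverse, pending body lines in reverse)
def pvStepB (st : List (String × String) × List String) (line : String) :
    List (String × String) × List String :=
  if pvIsHeader line then
    (st.1 ++ [(pvTitle line, PySem.Str.strip (PySem.Str.join "\n" st.2.reverse))], [])
  else (st.1, st.2 ++ [line])

def append_section_text_alt (existing : String) (title : String) (body : String) : String :=
  let body := PySem.Str.strip body
  if body = "" then existing
  else
    let lines := PySem.Str.splitlines existing
    let sections := ((lines.reverse).foldl pvStepB ([], [])).1.reverse
    let sections' :=
      match sections.findIdx? (fun p => p.1 == title) with   -- next((i for …), None)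
      | some i =>
          PySem.List.slice sections none (some (i : Int)) ++ [(title, body)] ++
            PySem.List.slice sections (some ((i : Int) + 1)) none
      | none => sections ++ [(title, body)]
    pvRender sections'

-- ===== PRECONDITION & SPEC =====
def Spec_append_section_text (existing : String) (title : String) (body : String) (out : String) : Prop := out = append_section_text_alt existing title body
instance (existing : String) (title : String) (body : String) (out : String) : Decidable (Spec_append_section_text existing title body out) := by unfold Spec_append_section_text; infer_instance

-- ===== CLAIM (what is proved, stated in full; the proofs are below) =====
def Claim_equal_append_section_text : Prop := ∀ (existing : String) (title : String) (body : String), Dom_append_section_text existing title body → Spec_append_section_text existing title body (append_section_text existing title body)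

-- ===== LEMMAS AND PROOFS =====

-- reference parse, used only by the proofs: skip to the next header / take the body lines
def pvSkip : List String → List String
  | [] => []
  | l :: rest => if pvIsHeader l then l :: rest else pvSkip rest

def pvBody : List String → List String
  | [] => []
  | l :: rest => if pvIsHeader l then [] else l :: pvBody rest

lemma pvSkip_length : ∀ xs : List String, (pvSkip xs).length ≤ xs.length := by
  intro xs; induction xs with
  | nil => simp [pvSkip]
  | cons l rest ih => by_cases h : pvIsHeader l <;> simp [pvSkip, h] <;> omega

def pvParse (xs : List String) : List (String × String) :=
  match h : pvSkip xs with
  | [] => []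
  | l :: rest => (pvTitle l, PySem.Str.strip (PySem.Str.join "\n" (pvBody rest))) :: pvParse rest
termination_by xs.length
decreasing_by
  have := pvSkip_length xs; rw [h] at this; simp at this; omega

lemma pvSkip_cons_header {l : String} {rest : List String} (h : pvIsHeader l = true) :
    pvSkip (l :: rest) = l :: rest := by simp [pvSkip, h]

lemma pvSkip_cons_not {l : String} {rest : List String} (h : pvIsHeader l = false) :
    pvSkip (l :: rest) = pvSkip rest := by simp [pvSkip, h]

lemma pvParse_nil_of {xs : List String} (h : pvSkip xs = []) : pvParse xs = [] := by
  rw [pvParse]; split <;> simp_all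

lemma pvParse_cons_of {xs l rest} (h : pvSkip xs = l :: rest) :
    pvParse xs = (pvTitle l, PySem.Str.strip (PySem.Str.join "\n" (pvBody rest))) :: pvParse rest := by
  rw [pvParse]; split <;> simp_all

lemma pvParse_nil : pvParse [] = [] := pvParse_nil_of rfl

lemma pvParse_cons_header {l : String} {rest : List String} (h : pvIsHeader l = true) :
    pvParse (l :: rest) =
      (pvTitle l, PySem.Str.strip (PySem.Str.join "\n" (pvBody rest))) :: pvParse rest :=
  pvParse_cons_of (pvSkip_cons_header h)

lemma pvParse_cons_not {l : String} {rest : List String} (h : pvIsHeader l = false) :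
    pvParse (l :: rest) = pvParse rest := by
  cases hs : pvSkip rest with
  | nil => rw [pvParse_nil_of ((pvSkip_cons_not h).trans hs), pvParse_nil_of hs]
  | cons l' rest' =>
    rw [pvParse_cons_of ((pvSkip_cons_not h).trans hs), pvParse_cons_of hs]

lemma pvParse_skip (xs : List String) : pvParse (pvSkip xs) = pvParse xs := by
  induction xs with
  | nil => rfl
  | cons l rest ih =>
    by_cases h : pvIsHeader l
    · rw [pvSkip_cons_header h]
    · rw [pvSkip_cons_not (by simpa using h), pvParse_cons_not (by simpa using h), ih]

-- the two ports' loop steps, by state shape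
lemma pvStepA_h_some {l t secs cur} (h : pvIsHeader l = true) :
    pvStepA (secs, some t, cur) l =
      (secs ++ [(t, PySem.Str.strip (PySem.Str.join "\n" cur))], some (pvTitle l), []) := by
  simp [pvStepA, h]

lemma pvStepA_h_none {l secs cur} (h : pvIsHeader l = true) :
    pvStepA (secs, none, cur) l = (secs, some (pvTitle l), []) := by
  simp [pvStepA, h]

lemma pvStepA_nh {l secs t? cur} (h : pvIsHeader l = false) :
    pvStepA (secs, t?, cur) l = (secs, t?, cur ++ [l]) := by
  simp [pvStepA, h]

lemma pvStepB_h {l secs pend} (h : pvIsHeader l = true) :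
    pvStepB (secs, pend) l =
      (secs ++ [(pvTitle l, PySem.Str.strip (PySem.Str.join "\n" pend.reverse))], []) := by
  simp [pvStepB, h]

lemma pvStepB_nh {l secs pend} (h : pvIsHeader l = false) :
    pvStepB (secs, pend) l = (secs, pend ++ [l]) := by
  simp [pvStepB, h]

-- A side: in the titleless state the accumulated lines are discarded
lemma pvA_cur_irrel : ∀ (xs : List String) (cur : List String),
    pvFinishA (xs.foldl pvStepA ([], none, cur)) = pvFinishA (xs.foldl pvStepA ([], none, [])) := by
  intro xs; induction xs with
  | nil => intro cur; rfl
  | cons l rest ih =>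
    intro cur
    by_cases h : pvIsHeader l
    · rw [List.foldl_cons, List.foldl_cons, pvStepA_h_none h, pvStepA_h_none h]
    · rw [List.foldl_cons, List.foldl_cons, pvStepA_nh (by simpa using h),
        pvStepA_nh (by simpa using h), List.nil_append]
      exact (ih (cur ++ [l])).trans (ih [l]).symm

-- A side: once a title is active, A emits (t, body-so-far ++ lines-to-next-header) and restarts
lemma pvA_active : ∀ (xs : List String) (secs : List (String × String)) (t : String) (cur : List String),
    pvFinishA (xs.foldl pvStepA (secs, some t, cur)) =
      secs ++ (t, PySem.Str.strip (PySem.Str.join "\n" (cur ++ pvBody xs))) ::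
        pvFinishA ((pvSkip xs).foldl pvStepA ([], none, [])) := by
  intro xs; induction xs with
  | nil => intro secs t cur; simp [pvFinishA, pvBody, pvSkip]
  | cons l rest ih =>
    intro secs t cur
    by_cases h : pvIsHeader l
    · rw [List.foldl_cons, pvStepA_h_some h, ih, pvSkip_cons_header h,
        List.foldl_cons, pvStepA_h_none h, ih]
      simp [pvBody, h]
    · rw [List.foldl_cons, pvStepA_nh (by simpa using h), ih,
        pvSkip_cons_not (by simpa using h)]
      simp [pvBody, (by simpa using h : pvIsHeader l = false)]

-- A's whole parse is the reference parse
lemma pvA_parse : ∀ (n : Nat) (xs : List String), xs.length ≤ n →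
    pvFinishA (xs.foldl pvStepA ([], none, [])) = pvParse xs := by
  intro n; induction n with
  | zero =>
    intro xs h
    have : xs = [] := by cases xs <;> simp_all
    subst this; simpa [pvFinishA] using pvParse_nil.symm
  | succ n ih =>
    intro xs h
    cases xs with
    | nil => simpa [pvFinishA] using pvParse_nil.symm
    | cons l rest =>
      by_cases hl : pvIsHeader l
      · rw [List.foldl_cons, pvStepA_h_none hl, pvA_active rest [] (pvTitle l) []]
        have hsk : (pvSkip rest).length ≤ n := le_trans (pvSkip_length rest) (by simpa using h)
        rw [ih (pvSkip rest) hsk, pvParse_skip, pvParse_cons_header hl]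
        simp
      · rw [List.foldl_cons, pvStepA_nh (by simpa using hl), List.nil_append,
          pvA_cur_irrel rest [l], ih rest (by simpa using h),
          pvParse_cons_not (by simpa using hl)]

-- B side: the reverse pass computes the reference parse (reversed), pending = reversed body prefix
lemma pvB_foldr : ∀ xs : List String,
    xs.foldr (fun x y => pvStepB y x) (([], []) : List (String × String) × List String) =
      ((pvParse xs).reverse, (pvBody xs).reverse) := by
  intro xs; induction xs with
  | nil => simp [pvParse_nil, pvBody]
  | cons l rest ih =>
    rw [List.foldr_cons]
    by_cases h : pvIsHeader l
    · rw [ih, pvStepB_h h, pvParse_cons_header h]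
      simp [pvBody, h]
    · rw [ih, pvStepB_nh (by simpa using h), pvParse_cons_not (by simpa using h)]
      simp [pvBody, (by simpa using h : pvIsHeader l = false)]

-- the replace-or-append step: A's indexed for/break + set equals B's next() + slicing
lemma pvFindA_eq : ∀ (secs : List (String × String)) (title : String) (i : Nat),
    pvFindA title i secs = (secs.findIdx? (fun p => p.1 == title)).map (· + i) := by
  intro secs title; induction secs with
  | nil => intro i; rfl
  | cons p rest ih =>
    intro i
    obtain ⟨t, b⟩ := p
    by_cases h : t == title
    · simp [pvFindA, h, List.findIdx?_cons]
    · have h' : (t == title) = false := by simpa using h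
      simp only [pvFindA, h', Bool.false_eq_true, if_false, List.findIdx?_cons]
      rw [ih (i + 1)]
      cases rest.findIdx? (fun p => p.1 == title) <;> simp <;> omega

lemma pvReplace_eq (secs : List (String × String)) (title body : String) :
    (match pvFindA title 0 secs with
      | some i => secs.set i (title, body)
      | none => secs ++ [(title, body)]) =
    (match secs.findIdx? (fun p => p.1 == title) with
      | some i =>
          PySem.List.slice secs none (some (i : Int)) ++ [(title, body)] ++
            PySem.List.slice secs (some ((i : Int) + 1)) none
      | none => secs ++ [(title, body)]) := by
  rw [pvFindA_eq secs title 0]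
  cases hf : secs.findIdx? (fun p => p.1 == title) with
  | none => rfl
  | some i =>
    have hi : i < secs.length := (List.findIdx?_eq_some_iff_findIdx_eq.mp hf).1
    simp only [Option.map_some, Nat.add_zero]
    rw [List.set_eq_take_append_cons_drop, if_pos hi]
    rw [PySem.List.slice_to_natCast,
      show ((i : Int) + 1) = ((i + 1 : Nat) : Int) by push_cast; ring,
      PySem.List.slice_from_natCast]
    simp

-- ===== VERDICT (by name: the statement is the Claim_ definition above) =====
theorem append_section_text_spec : Claim_equal_append_section_text := by
  intro existing title body _
  unfold Spec_append_section_text append_section_text append_section_text_alt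
  by_cases hb : PySem.Str.strip body = ""
  · simp [hb]
  · simp only [hb, if_false]
    rw [List.foldl_reverse, pvB_foldr, pvA_parse (PySem.Str.splitlines existing).length _ le_rfl]
    simp only [List.reverse_reverse]
    rw [pvReplace_eq]
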